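-- pv_equiv track=rewrite | github.com/nmack-dev/edgedev | src/Lab 2/sensor_datalogger.py | str_chop
-- ===== SOURCE A (Python) =====
-- def str_chop(string):
--     old_str = str(string)
--     new_str = ''
--     count = 0
--     chop = False
--
--     for char in old_str:
--         if (count <= 2):
--             new_str += char
--         else:
--             break
--
--         if ((char == '.') | chop == True):
--             chop = True
--             count += 1
--
--     return new_str
-- ===== SOURCE B (Python) =====
-- def str_chop(string):
--     s = str(string)
--     i = s.find('.')
--     return s if i == -1 else s[:i + 3]
-- ===== Notes on version B (the rewrite author's own statement) =====
-- stated objective: simpler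
-- what changed: Replaced the char-by-char copy loop with its count counter and chop flag by computing the cut point directly: locate the first decimal point and slice the string up to two characters past it, returning the string unchanged when there is no decimal point.
import Mathlib
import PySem

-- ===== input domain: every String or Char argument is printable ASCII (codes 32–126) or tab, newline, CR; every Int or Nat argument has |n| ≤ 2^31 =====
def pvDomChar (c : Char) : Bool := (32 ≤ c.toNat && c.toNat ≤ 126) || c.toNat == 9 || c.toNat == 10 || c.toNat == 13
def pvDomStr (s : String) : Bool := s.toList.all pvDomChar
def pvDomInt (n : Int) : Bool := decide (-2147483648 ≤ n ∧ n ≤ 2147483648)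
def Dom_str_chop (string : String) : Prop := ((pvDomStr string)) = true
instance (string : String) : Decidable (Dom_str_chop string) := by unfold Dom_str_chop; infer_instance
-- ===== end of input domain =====

-- B replaces A's char loop (count counter + chop flag + break) by locating the first '.' and slicing s[:i+3]; same return value, simpler.

-- ===== PORT A =====
-- the for-loop over old_str with state (new_str, count, chop); break = return new_str
def strChopGo : List Char → List Char → Nat → Bool → List Char
  | [], new_str, _, _ => new_str
  | c :: rest, new_str, count, chop =>
    if count ≤ 2 then
      -- new_str += char, then: if (char == '.') | chop == True: chop = True; count += 1
      if (c == '.') || chop then strChopGo rest (new_str ++ [c]) (count + 1) true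
      else strChopGo rest (new_str ++ [c]) count chop
    else new_str

def str_chop (string : String) : String :=
  String.ofList (strChopGo string.toList [] 0 false)

-- ===== PORT B =====
def str_chop_alt (string : String) : String :=
  let i := PySem.Str.find string "."
  if i == -1 then string else PySem.Str.slice string none (some (i + 3))

-- ===== PRECONDITION & SPEC =====
def Spec_str_chop (string : String) (out : String) : Prop := out = str_chop_alt string
instance (string : String) (out : String) : Decidable (Spec_str_chop string out) := by unfold Spec_str_chop; infer_instance

-- ===== CLAIM (what is proved, stated in full; the proofs are below) =====
def Claim_equal_str_chop : Prop := ∀ (string : String), Dom_str_chop string → Spec_str_chop string (str_chop string)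

-- ===== LEMMAS AND PROOFS =====

-- once chop is true, the loop appends exactly (3 - count) more characters
theorem strChopGo_true (l : List Char) : ∀ (acc : List Char) (count : Nat),
    strChopGo l acc count true = acc ++ l.take (3 - count) := by
  induction l with
  | nil => intro acc count; simp [strChopGo]
  | cons c rest ih =>
    intro acc count
    by_cases h : count ≤ 2
    · have h3 : 3 - count = (3 - (count + 1)) + 1 := by omega
      simp [strChopGo, h, ih, h3, List.take_succ_cons]
    · have h3 : 3 - count = 0 := by omega
      simp [strChopGo, h, h3]

-- before the first dot, the loop copies characters; at the dot it keeps it and 2 more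
theorem strChopGo_false (l : List Char) : ∀ (acc : List Char),
    strChopGo l acc 0 false =
      acc ++ (match l.findIdx? (· = '.') with
              | none => l
              | some i => l.take (i + 3)) := by
  induction l with
  | nil => intro acc; simp [strChopGo]
  | cons c rest ih =>
    intro acc
    by_cases hc : c = '.'
    · subst hc
      simp [strChopGo, strChopGo_true, List.findIdx?_cons, List.take_succ_cons]
    · have hb : (c == '.') = false := by simp [hc]
      simp only [strChopGo, hb, Bool.false_or]
      rw [ih]
      simp [List.findIdx?_cons, hc]
      cases h : rest.findIdx? (· = '.') with
      | none => simp
      | some i => simp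

-- a singleton needle is a prefix of l.drop j iff the character at j is the needle
theorem singleton_prefix_drop_iff (a : Char) (l : List Char) (j : Nat) :
    [a] <+: l.drop j ↔ l[j]? = some a := by
  rw [← List.head?_drop]
  cases l.drop j with
  | nil => simp
  | cons b t => simp [List.cons_prefix_cons, eq_comm]

-- Chars.find with a single-character needle is findIdx?
theorem find_dot_eq_findIdx? (l : List Char) :
    PySem.Chars.find l ['.'] =
      (match l.findIdx? (· = '.') with
       | none => -1
       | some i => (i : Int)) := by
  cases h : l.findIdx? (· = '.') with
  | none =>
    rw [List.findIdx?_eq_none_iff] at h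
    rw [PySem.Chars.find_eq_neg_one_iff]
    intro hinf
    rw [← PySem.Chars.isIn_iff_infix, ← PySem.Chars.exists_prefix_drop_iff_isIn] at hinf
    obtain ⟨j, hj⟩ := hinf
    rw [singleton_prefix_drop_iff] at hj
    have := h '.' (List.mem_of_getElem? hj)
    simp at this
  | some i =>
    rw [List.findIdx?_eq_some_iff_getElem] at h
    obtain ⟨hi, hdot, hminA⟩ := h
    simp only [decide_eq_true_eq] at hdot hminA
    have hgetI : l[i]? = some '.' := by rw [List.getElem?_eq_getElem hi, hdot]
    have hpos : 0 ≤ PySem.Chars.find l ['.'] := by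
      rw [PySem.Chars.find_nonneg_iff, ← PySem.Chars.isIn_iff_infix,
        ← PySem.Chars.exists_prefix_drop_iff_isIn]
      exact ⟨i, by rw [singleton_prefix_drop_iff]; exact hgetI⟩
    obtain ⟨hpre, hmin⟩ := PySem.Chars.find_spec (s := l) (sub := ['.']) hpos
    rw [singleton_prefix_drop_iff] at hpre
    have hii : (PySem.Chars.find l ['.']).toNat = i := by
      by_contra hne
      rcases Nat.lt_or_ge (PySem.Chars.find l ['.']).toNat i with hlt | hge
      · have hlen : (PySem.Chars.find l ['.']).toNat < l.length := by omega
        rw [List.getElem?_eq_getElem hlen] at hpre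
        exact hminA _ hlt (Option.some.inj hpre)
      · have hlt : i < (PySem.Chars.find l ['.']).toNat := by omega
        have hcontra := hmin i hlt
        rw [singleton_prefix_drop_iff] at hcontra
        exact hcontra hgetI
    simp only
    omega

theorem str_chop_spec' (string : String) : str_chop string = str_chop_alt string := by
  unfold str_chop str_chop_alt
  have hfind : PySem.Str.find string "." = PySem.Chars.find string.toList ['.'] := by
    simp [PySem.Str.find_eq]
  rw [strChopGo_false, hfind, find_dot_eq_findIdx?]
  cases h : string.toList.findIdx? (· = '.') with
  | none => simp
  | some i =>
    simp only [List.nil_append]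
    have hne : ((i : Int) == -1) = false := by simp
    rw [hne]
    simp only [Bool.false_eq_true, if_false]
    apply String.toList_injective
    rw [PySem.Str.toList_slice]
    simp only [PySem.Chars.slice_eq_listSlice]
    have : (i : Int) + 3 = ((i + 3 : Nat) : Int) := by push_cast; ring
    rw [this, PySem.List.slice_to_natCast]
    simp

-- ===== VERDICT (by name: the statement is the Claim_ definition above) =====
theorem str_chop_spec : Claim_equal_str_chop := by
  intro s _
  exact str_chop_spec' s
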